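-- pv_equiv track=rewrite | github.com/raulpenaguiao/project-euler | archive/Euler02__/Euler240/Euler240.py | ExtentionsPermutation
-- ===== SOURCE A (Python) =====
-- factorial = [1 for i in range(25)]
--
-- def PermutationsOfList(list):
--     if list == []:
--         return 1
--     a = list[:]
--     l = len(a)
--     ans = factorial[l]
--     noCopies = [a[0]]
--     for i in range(1, l):
--         if not a[i] == a[i-1]:
--             noCopies.append(a[i])
--     for c in noCopies:
--         countCopies = a.count(c)
--         ans //= factorial[countCopies]
--     return ans
--
-- def ExtentionsPermutation(lst, val):
--     ans = 0
--     m = min(lst)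
--     lm = lst.count(m)
--     l = len(lst)
--     for k in range(val - l+1):
--         ans += (m-1)**(val - l - k) * PermutationsOfList(lst + [m]*k + [0]*(val - l - k) )
--     return ans
-- ===== SOURCE B (Python) =====
-- def ExtentionsPermutation(lst, val):
--     # factorial in the original module is a list of 25 ones, so every
--     # PermutationsOfList call yields 1 and the sum is the geometric series
--     # sum_{j=0}^{val-len(lst)} (min(lst)-1)**j; compute it in closed form.
--     n = val - len(lst) + 1
--     if n <= 0:
--         return 0
--     r = min(lst) - 1
--     if r == 1:
--         return n
--     return (r ** n - 1) // (r - 1)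
-- ===== Notes on version B (the rewrite author's own statement) =====
-- stated objective: faster
-- what changed: A builds val-length lists and recomputes multiset-permutation counts (which are all 1, since the module's 'factorial' table is all ones) for each of the val-len+1 terms; B evaluates the resulting geometric series sum_{j=0}^{val-len} (min(lst)-1)^j in closed form with one exponentiation.
import Mathlib
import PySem

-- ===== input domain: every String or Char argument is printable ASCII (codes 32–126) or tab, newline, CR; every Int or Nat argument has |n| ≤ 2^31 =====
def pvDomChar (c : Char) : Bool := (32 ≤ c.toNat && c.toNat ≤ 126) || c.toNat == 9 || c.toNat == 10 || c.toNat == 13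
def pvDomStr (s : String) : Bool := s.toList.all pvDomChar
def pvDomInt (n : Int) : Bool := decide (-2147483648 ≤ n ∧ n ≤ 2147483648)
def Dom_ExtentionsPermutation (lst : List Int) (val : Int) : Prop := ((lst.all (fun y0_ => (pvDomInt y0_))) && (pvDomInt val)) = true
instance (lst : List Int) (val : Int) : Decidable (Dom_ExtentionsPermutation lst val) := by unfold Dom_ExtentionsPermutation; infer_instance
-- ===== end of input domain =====

-- B replaces A's loop (which rebuilds a val-length list and recomputes a multiset-permutation
-- count — always 1, as the module's 'factorial' table is all ones — per term) by the closed-form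
-- geometric series; objective: faster.

-- ===== PORT A =====
-- factorial = [1 for i in range(25)]
def pvFactorial : List Int := (PySem.List.pyRange 0 25 1).map (fun _ => 1)

def PermutationsOfList (list : List Int) : Int :=
  if list = [] then 1
  else
    let a := list                                   -- a = list[:]
    let l : Int := (a.length : Int)
    -- factorial[l], factorial[countCopies]: pyGetD is exact here; Pre_ keeps every index in range
    let ans := PySem.List.pyGetD pvFactorial l 0
    let noCopies := (PySem.List.pyRange 1 l 1).foldl (fun nc i =>
        if ¬ (PySem.List.pyGetD a i 0 = PySem.List.pyGetD a (i - 1) 0)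
        then nc ++ [PySem.List.pyGetD a i 0] else nc)
      [PySem.List.pyGetD a 0 0]
    noCopies.foldl (fun ans c =>
        PySem.Int.floordiv ans (PySem.List.pyGetD pvFactorial ((PySem.List.count a c : Int)) 0)) ans

def ExtentionsPermutation (lst : List Int) (val : Int) : Int :=
  let m := (PySem.List.min? lst (fun x => x)).getD 0   -- min(lst); raises on [] — excluded by Pre_
  let _lm := PySem.List.count lst m                    -- lm (unused, as in A)
  let l : Int := (lst.length : Int)
  (PySem.List.pyRange 0 (val - l + 1) 1).foldl (fun ans k =>
      ans + (m - 1) ^ (val - l - k).toNat *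
        PermutationsOfList (lst ++ PySem.List.pyRepeat [m] k ++ PySem.List.pyRepeat [0] (val - l - k))) 0

-- ===== PORT B =====
def ExtentionsPermutation_alt (lst : List Int) (val : Int) : Int :=
  let n := val - (lst.length : Int) + 1
  if n ≤ 0 then 0
  else
    let r := ((PySem.List.min? lst (fun x => x)).getD 0) - 1
    if r = 1 then n
    else PySem.Int.floordiv (r ^ n.toNat - 1) (r - 1)

-- ===== PRECONDITION & SPEC =====
-- Pre_ is exactly where A returns: lst nonempty (min),
-- and if the loop runs (len ≤ val) then val ≤ 24 (else factorial[val] is an IndexError).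
def Pre_ExtentionsPermutation (lst : List Int) (val : Int) : Prop :=
  lst ≠ [] ∧ (val < (lst.length : Int) ∨ val ≤ 24)
instance (lst : List Int) (val : Int) : Decidable (Pre_ExtentionsPermutation lst val) := by
  unfold Pre_ExtentionsPermutation; infer_instance
def pvWitness_ExtentionsPermutation : List Int × Int := ([3, 1, 2], 10)

def Spec_ExtentionsPermutation (lst : List Int) (val : Int) (out : Int) : Prop := out = ExtentionsPermutation_alt lst val
instance (lst : List Int) (val : Int) (out : Int) : Decidable (Spec_ExtentionsPermutation lst val out) := by unfold Spec_ExtentionsPermutation; infer_instance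

-- ===== CLAIM (what is proved, stated in full; the proofs are below) =====
def Claim_equal_ExtentionsPermutation : Prop := ∀ (lst : List Int) (val : Int), Dom_ExtentionsPermutation lst val → Pre_ExtentionsPermutation lst val → Spec_ExtentionsPermutation lst val (ExtentionsPermutation lst val)

-- ===== LEMMAS AND PROOFS =====

-- every in-range lookup in the all-ones factorial table is 1
theorem pvFact_getD (i : Int) (h0 : 0 ≤ i) (h1 : i < 25) :
    PySem.List.pyGetD pvFactorial i 0 = 1 := by
  have hrep : pvFactorial = List.replicate 25 (1 : Int) := by decide
  rw [PySem.List.pyGetD_eq_getElem pvFactorial 0 h0 (by rw [hrep]; simpa using h1)]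
  simp only [hrep]; exact List.getElem_replicate _

-- the division loop of PermutationsOfList divides by 1 each time
theorem pvDivFold (a : List Int) (ha : a.length ≤ 24) (nc : List Int) (x : Int) :
    nc.foldl (fun ans c =>
        PySem.Int.floordiv ans (PySem.List.pyGetD pvFactorial ((PySem.List.count a c : Int)) 0)) x = x := by
  induction nc generalizing x with
  | nil => rfl
  | cons c t ih =>
      simp only [List.foldl_cons]
      rw [pvFact_getD _ (by positivity) (by
        have := List.count_le_length (l := a) (a := c)
        simp only [PySem.List.count]; omega)]
      rw [show PySem.Int.floordiv x 1 = x by simp [PySem.Int.floordiv], ih]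

theorem pvPermOne (xs : List Int) (hne : xs ≠ []) (hlen : xs.length ≤ 24) :
    PermutationsOfList xs = 1 := by
  unfold PermutationsOfList
  rw [if_neg hne]
  simp only []
  rw [pvFact_getD _ (by positivity) (by exact_mod_cast by omega)]
  exact pvDivFold xs hlen _ 1

-- reflected geometric sum
theorem pvGeomReflect (r : Int) (n : Nat) :
    ((List.range n).map (fun k => r ^ (n - 1 - k))).sum = ∑ j ∈ Finset.range n, r ^ j := by
  have h1 : ((List.range n).map (fun k => r ^ (n - 1 - k))).sum
      = ∑ k ∈ Finset.range n, r ^ (n - 1 - k) := by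
    exact Int.neg_inj.mp rfl
  rw [h1, Finset.sum_range_reflect (fun j => r ^ j) n]

theorem ExtentionsPermutation_spec_aux (lst : List Int) (val : Int)
    (hne : lst ≠ []) (hv : val < (lst.length : Int) ∨ val ≤ 24) :
    ExtentionsPermutation lst val = ExtentionsPermutation_alt lst val := by
  unfold ExtentionsPermutation ExtentionsPermutation_alt
  simp only []
  set m := (PySem.List.min? lst (fun x => x)).getD 0 with hm
  set l : Int := (lst.length : Int) with hl
  by_cases hneg : val - l + 1 ≤ 0
  · rw [if_pos hneg, PySem.List.pyRange_one_eq_nil (by omega), List.foldl_nil]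
  · rw [if_neg hneg]
    have hlv : l ≤ val := by omega
    have hv24 : val ≤ 24 := by rcases hv with h | h <;> omega
    have hlpos : (0 : Int) < l := by
      have : lst.length ≠ 0 := fun h => hne (List.eq_nil_of_length_eq_zero h)
      omega
    -- each PermutationsOfList call in the loop returns 1
    have hP : ∀ k ∈ PySem.List.pyRange 0 (val - l + 1) 1,
        PermutationsOfList (lst ++ PySem.List.pyRepeat [m] k ++ PySem.List.pyRepeat [0] (val - l - k)) = 1 := by
      intro k hk
      rw [PySem.List.mem_pyRange_one] at hk
      apply pvPermOne
      · simp [hne]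
      · simp only [List.length_append, PySem.List.pyRepeat_singleton, List.length_replicate]
        omega
    -- the loop is the reflected geometric sum
    have hfold : (PySem.List.pyRange 0 (val - l + 1) 1).foldl (fun ans k =>
          ans + (m - 1) ^ (val - l - k).toNat *
            PermutationsOfList (lst ++ PySem.List.pyRepeat [m] k ++ PySem.List.pyRepeat [0] (val - l - k))) 0
        = ∑ j ∈ Finset.range (val - l + 1).toNat, (m - 1) ^ j := by
      rw [PySem.List.foldl_congr_mem _ _
          (fun ans k => ans + (m - 1) ^ (val - l - k).toNat) _
          (by intro acc k hk; rw [hP k hk, mul_one])]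
      rw [PySem.List.foldl_add _ (fun k => (m - 1) ^ (val - l - k).toNat)]
      rw [zero_add, PySem.List.pyRange_one, List.map_map]
      rw [← pvGeomReflect (m - 1) (val - l + 1).toNat]
      simp only [sub_zero]
      congr 1
      apply List.map_congr_left
      intro k hk
      rw [List.mem_range] at hk
      simp only [Function.comp_apply, zero_add]
      congr 1
      omega
    rw [hfold]
    set n : Nat := (val - l + 1).toNat with hn
    by_cases hr1 : m - 1 = 1
    · rw [if_pos hr1, hr1]
      simp only [one_pow, Finset.sum_const, Finset.card_range, nsmul_eq_mul, mul_one]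
      omega
    · rw [if_neg hr1]
      rw [← geom_sum_mul (m - 1) n]
      simp only [PySem.Int.floordiv]
      exact (Int.mul_fdiv_cancel _ (by omega)).symm

-- ===== VERDICT (by name: the statement is the Claim_ definition above) =====
theorem ExtentionsPermutation_spec : Claim_equal_ExtentionsPermutation := by
  intro lst val _ hpre
  exact ExtentionsPermutation_spec_aux lst val hpre.1 hpre.2
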